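-- pv_equiv track=rewrite | github.com/MAInformatico/Hackerrank | InterviewPreparationKits/GoodlandElectricity.py | pylons
-- ===== SOURCE A (Python) =====
-- import bisect
--
-- def pylons(k, arr):
--     n=len(arr)
--     aux=[]
--     for i in range(n):
--         if arr[i] == 1:
--            aux.append(i)
--     finish = -1
--     result = 0
--     begin = 0
--     while finish<n-1:
--         i = bisect.bisect_right(aux,finish+k,begin)-1
--         if i<0:
--             return -1
--         begin = i
--         result += 1
--         localFinish = aux[i]+(k-1)
--         if localFinish == finish:
--             return -1
--         finish = localFinish
--
--     return result
-- ===== SOURCE B (Python) =====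
-- def pylons(k, arr):
--     # Simpler: no aux index list, no bisect -- scan the array itself downward
--     # for the rightmost power plant that can cover the first uncovered city.
--     n = len(arr)
--     finish = -1
--     result = 0
--     while finish < n - 1:
--         p = min(finish + k, n - 1)
--         while p >= 0 and arr[p] != 1:
--             p -= 1
--         if p < 0:
--             return -1
--         if p + k - 1 == finish:
--             return -1
--         finish = p + k - 1
--         result += 1
--     return result
-- ===== Notes on version B (the rewrite author's own statement) =====
-- stated objective: simpler
-- what changed: B drops the aux index list and the bisect binary search entirely: it keeps only (finish, result) and finds each next plant by scanning the array itself downward from min(finish+k, n-1) for the rightmost 1.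
import Mathlib
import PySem

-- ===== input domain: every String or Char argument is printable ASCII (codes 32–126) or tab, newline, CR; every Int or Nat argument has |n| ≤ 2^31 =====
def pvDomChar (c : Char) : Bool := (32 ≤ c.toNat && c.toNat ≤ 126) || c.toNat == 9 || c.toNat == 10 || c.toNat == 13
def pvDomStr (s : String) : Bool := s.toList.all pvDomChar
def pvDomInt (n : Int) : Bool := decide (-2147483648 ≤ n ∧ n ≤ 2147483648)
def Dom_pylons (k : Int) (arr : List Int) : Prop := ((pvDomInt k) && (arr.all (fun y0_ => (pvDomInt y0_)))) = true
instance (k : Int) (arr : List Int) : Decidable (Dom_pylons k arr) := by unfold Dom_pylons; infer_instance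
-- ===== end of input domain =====

-- B drops A's aux index list and bisect entirely: it scans the array itself downward for
-- the rightmost plant covering the first uncovered city (objective: simpler).

-- ===== PORT A =====
-- bisect.bisect_right(aux, x, begin): the stdlib call, ported via the PySem primitive;
-- with lo=begin it is begin + bisect_right(aux[begin:], x) — exact on the sorted aux.
def bisectRightFrom (aux : List Int) (x : Int) (begin : Nat) : Nat :=
  begin + PySem.List.bisectRight (aux.drop begin) x

-- the while loop of A; fuel = n+1 is exact: each iteration either returns or strictly
-- increases finish, which stays < n-1 on entry, so the 0-fuel branch is never reached.
def pylonsLoopA (k n : Int) (aux : List Int) : Nat → Int → Int → Nat → Int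
  | 0, _, result, _ => result
  | fuel+1, finish, result, begin =>
    if finish < n - 1 then
      let i : Int := (bisectRightFrom aux (finish + k) begin : Int) - 1
      if i < 0 then -1
      else
        -- aux[i] with 0 ≤ i < len aux here, so plain getD is Python's aux[i]
        let localFinish := aux.getD i.toNat 0 + (k - 1)
        if localFinish = finish then -1
        else pylonsLoopA k n aux fuel localFinish (result + 1) i.toNat
    else result

def pylons (k : Int) (arr : List Int) : Int :=
  let n : Int := arr.length
  let aux := (PySem.List.pyRange 0 n 1).foldl
    (fun aux i => if PySem.List.pyGetD arr i 0 = 1 then aux ++ [i] else aux) []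
  pylonsLoopA k n aux (arr.length + 1) (-1) 0 0

-- ===== PORT B =====
-- inner while of B: step p downward while p >= 0 and arr[p] != 1 (p < len arr at every access)
def findPlant (arr : List Int) (p : Int) : Int :=
  if 0 ≤ p then
    if PySem.List.pyGetD arr p 0 ≠ 1 then findPlant arr (p - 1) else p
  else p
termination_by (p + 1).toNat
decreasing_by omega

-- outer while of B; same exact fuel n+1 as A's loop (see comment there)
def pylonsLoopB (k n : Int) (arr : List Int) : Nat → Int → Int → Int
  | 0, _, result => result
  | fuel+1, finish, result =>
    if finish < n - 1 then
      let p := findPlant arr (min (finish + k) (n - 1))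
      if p < 0 then -1
      else if p + k - 1 = finish then -1
      else pylonsLoopB k n arr fuel (p + k - 1) (result + 1)
    else result

def pylons_alt (k : Int) (arr : List Int) : Int :=
  pylonsLoopB k arr.length arr (arr.length + 1) (-1) 0

-- ===== PRECONDITION & SPEC =====
def Spec_pylons (k : Int) (arr : List Int) (out : Int) : Prop := out = pylons_alt k arr
instance (k : Int) (arr : List Int) (out : Int) : Decidable (Spec_pylons k arr out) := by unfold Spec_pylons; infer_instance

-- ===== CLAIM (what is proved, stated in full; the proofs are below) =====
def Claim_equal_pylons : Prop := ∀ (k : Int) (arr : List Int), Dom_pylons k arr → Spec_pylons k arr (pylons k arr)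

-- ===== LEMMAS AND PROOFS =====

-- the list A builds: the plant positions, in increasing order
def auxOf (arr : List Int) : List Int :=
  (PySem.List.pyRange 0 (arr.length : Int) 1).filter (fun i => PySem.List.pyGetD arr i 0 = 1)

-- "q is a plant position"
def IsPlant (arr : List Int) (q : Int) : Prop :=
  0 ≤ q ∧ q < (arr.length : Int) ∧ PySem.List.pyGetD arr q 0 = 1

lemma auxOf_eq_foldl (arr : List Int) :
    (PySem.List.pyRange 0 (arr.length : Int) 1).foldl
      (fun aux i => if PySem.List.pyGetD arr i 0 = 1 then aux ++ [i] else aux) [] = auxOf arr := by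
  unfold auxOf
  rw [PySem.List.foldl_append_ite_eq_filter]
  simp

lemma mem_auxOf {arr : List Int} {q : Int} : q ∈ auxOf arr ↔ IsPlant arr q := by
  unfold auxOf IsPlant
  simp [List.mem_filter, PySem.List.mem_pyRange_one]
  tauto

lemma auxOf_pairwise (arr : List Int) : (auxOf arr).Pairwise (· < ·) :=
  (PySem.List.pairwise_lt_pyRange_one 0 _).filter _

-- characterisation of B's downward scan: either no plant ≤ m, or it returns the largest one
lemma findPlant_spec (arr : List Int) (m : Int) :
    (findPlant arr m < 0 ∧ ∀ q, IsPlant arr q → ¬ q ≤ m) ∨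
    (IsPlant arr (findPlant arr m) ∧ findPlant arr m ≤ m ∧
      ∀ q, IsPlant arr q → q ≤ m → q ≤ findPlant arr m) := by
  fun_induction findPlant arr m with
  | case1 p hp hne ih =>
    rcases ih with ⟨h1, h2⟩ | ⟨h1, h2, h3⟩
    · left
      refine ⟨h1, fun q hq hle => ?_⟩
      rcases eq_or_lt_of_le hle with rfl | hlt
      · exact hne hq.2.2
      · exact h2 q hq (by omega)
    · right
      refine ⟨h1, by omega, fun q hq hle => ?_⟩
      rcases eq_or_lt_of_le hle with rfl | hlt
      · exact absurd hq.2.2 hne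
      · exact h3 q hq (by omega)
  | case2 p hp hne =>
    by_cases hlen : p < (arr.length : Int)
    · right
      rw [not_not] at hne
      exact ⟨⟨hp, hlen, hne⟩, le_refl _, fun q _ hle => hle⟩
    · -- p ≥ len cannot reach this branch: the default-0 lookup is not 1
      exfalso
      rw [not_not] at hne
      have : PySem.List.pyGetD arr p 0 = 0 := by
        simp [PySem.List.pyGetD, PySem.List.pyGet?, PySem.List.pyIdx?, hp, hlen]
      omega
  | case3 p hp =>
    left
    exact ⟨by omega, fun q hq hle => by rcases hq with ⟨h0, -, -⟩; omega⟩

-- the reachable-state invariant of A's loop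
def InvA (k : Int) (aux : List Int) (finish : Int) (begin : Nat) : Prop :=
  (begin = 0 ∧ finish = -1) ∨
  (1 ≤ k ∧ begin < aux.length ∧ aux.getD begin 0 = finish - k + 1)

-- A's bisect step picks either nothing (no plant ≤ finish+k) or the largest plant ≤ finish+k
lemma stepA_pick (arr : List Int) (k finish : Int) (begin : Nat)
    (hInv : InvA k (auxOf arr) finish begin) :
    (bisectRightFrom (auxOf arr) (finish + k) begin = 0 ∧
       ∀ q, IsPlant arr q → ¬ q ≤ finish + k) ∨
    (∃ h : bisectRightFrom (auxOf arr) (finish + k) begin - 1 < (auxOf arr).length,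
       0 < bisectRightFrom (auxOf arr) (finish + k) begin ∧
       (auxOf arr)[bisectRightFrom (auxOf arr) (finish + k) begin - 1] ≤ finish + k ∧
       ∀ q, IsPlant arr q → q ≤ finish + k →
         q ≤ (auxOf arr)[bisectRightFrom (auxOf arr) (finish + k) begin - 1]) := by
  unfold bisectRightFrom
  set aux := auxOf arr with haux
  set x := finish + k with hx
  set r := PySem.List.bisectRight (aux.drop begin) x with hr
  have pw := auxOf_pairwise arr
  have hmono : ∀ (i j : Nat) (hi : i < aux.length) (hj : j < aux.length), i < j → aux[i] < aux[j] :=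
    fun i j hi hj hij => List.pairwise_iff_getElem.mp pw i j hi hj hij
  have hmle : ∀ (i j : Nat) (hi : i < aux.length) (hj : j < aux.length), i ≤ j → aux[i] ≤ aux[j] := by
    intro i j hi hj hij
    rcases eq_or_lt_of_le hij with rfl | h
    · exact le_refl _
    · exact le_of_lt (hmono i j hi hj h)
  have hdsorted : ((aux.drop begin)).Pairwise (· ≤ ·) :=
    ((pw.drop (i := begin))).imp (fun h => le_of_lt h)
  obtain ⟨hs1, hs2, hs3⟩ := PySem.List.bisectRight_spec (aux.drop begin) x hdsorted
  rw [← hr] at hs1 hs2 hs3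
  have hdlen : (aux.drop begin).length = aux.length - begin := List.length_drop
  have hidx : ∀ (q : Int), q ∈ aux → ∃ (j : Nat) (hj : j < aux.length), aux[j] = q := by
    intro q hq
    obtain ⟨j, hj, he⟩ := List.mem_iff_getElem.mp hq
    exact ⟨j, hj, he⟩
  have hdg : ∀ (j : Nat) (hj : j < (aux.drop begin).length), (aux.drop begin)[j] = aux[begin + j]'(by omega) := by
    intro j hj; simp [List.getElem_drop]
  by_cases hbr : begin + r = 0
  · left
    refine ⟨hbr, fun q hq hle => ?_⟩
    have hb0 : begin = 0 := by omega
    obtain ⟨j, hj, he⟩ := hidx q (mem_auxOf.mpr hq)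
    have := hs3 j (by omega) (by omega)
    rw [hdg j (by omega)] at this
    simp [hb0] at this
    omega
  · right
    have hr1 : 1 ≤ r := by
      rcases hInv with ⟨hb0, -⟩ | ⟨hk, hblen, hgd⟩
      · omega
      · by_contra h
        have hr0 : r = 0 := by omega
        have hlen0 : 0 < (aux.drop begin).length := by omega
        have := hs3 0 hlen0 (by omega)
        rw [hdg 0 hlen0] at this
        simp at this
        rw [List.getD_eq_getElem aux 0 hblen] at hgd
        omega
    have hin : begin + r - 1 < aux.length := by omega
    refine ⟨hin, by omega, ?_, ?_⟩
    · have h1 : r - 1 < (aux.drop begin).length := by omega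
      have := hs2 (r - 1) h1 (by omega)
      rw [hdg (r - 1) h1] at this
      have h2 : aux[begin + (r-1)]'(by omega) ≤ x := this
      convert h2 using 2
      omega
    · intro q hq hle
      obtain ⟨j, hj, he⟩ := hidx q (mem_auxOf.mpr hq)
      by_cases hjb : j + 1 ≤ begin + r
      · rw [← he]; exact hmle j _ hj hin (by omega)
      · exfalso
        have h2 : j - begin < (aux.drop begin).length := by omega
        have := hs3 (j - begin) h2 (by omega)
        rw [hdg _ h2] at this
        have hje : begin + (j - begin) = j := by omega
        simp [hje] at this
        omega

-- both loops agree from every state A's loop can reach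
lemma loop_eq (k : Int) (arr : List Int) :
    ∀ (fuel : Nat) (finish result : Int) (begin : Nat),
      InvA k (auxOf arr) finish begin →
      pylonsLoopA k (arr.length : Int) (auxOf arr) fuel finish result begin =
      pylonsLoopB k (arr.length : Int) arr fuel finish result := by
  intro fuel
  induction fuel with
  | zero => intro finish result begin _; rfl
  | succ f ih =>
    intro finish result begin hInv
    simp only [pylonsLoopA, pylonsLoopB]
    by_cases hg : finish < (arr.length : Int) - 1
    · rw [if_pos hg, if_pos hg]
      rcases stepA_pick arr k finish begin hInv with ⟨hz, hnone⟩ | ⟨hin, hpos, hle, hmax⟩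
      · have hA : ((bisectRightFrom (auxOf arr) (finish + k) begin : Nat) : Int) - 1 < 0 := by
          rw [hz]; norm_num
        rw [if_pos hA]
        have hB : findPlant arr (min (finish + k) ((arr.length : Int) - 1)) < 0 := by
          rcases findPlant_spec arr (min (finish + k) ((arr.length : Int) - 1)) with ⟨h1, _⟩ | ⟨h1, h2, _⟩
          · exact h1
          · exact absurd (le_trans h2 (min_le_left _ _)) (hnone _ h1)
        rw [if_pos hB]
      · have hplant : IsPlant arr ((auxOf arr)[bisectRightFrom (auxOf arr) (finish + k) begin - 1]'hin) :=
          mem_auxOf.mp (List.getElem_mem hin)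
        obtain ⟨hq0, hqn, -⟩ := hplant
        have hauxm : (auxOf arr)[bisectRightFrom (auxOf arr) (finish + k) begin - 1]'hin
            ≤ min (finish + k) ((arr.length : Int) - 1) := le_min hle (by omega)
        have hfp : findPlant arr (min (finish + k) ((arr.length : Int) - 1)) =
            (auxOf arr)[bisectRightFrom (auxOf arr) (finish + k) begin - 1]'hin := by
          rcases findPlant_spec arr (min (finish + k) ((arr.length : Int) - 1)) with ⟨h1, h2⟩ | ⟨h1, h2, h3⟩
          · exact absurd hauxm (h2 _ (mem_auxOf.mp (List.getElem_mem hin)))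
          · exact le_antisymm (hmax _ h1 (le_trans h2 (min_le_left _ _)))
              (h3 _ (mem_auxOf.mp (List.getElem_mem hin)) hauxm)
        have hA0 : ¬ ((bisectRightFrom (auxOf arr) (finish + k) begin : Nat) : Int) - 1 < 0 := by
          omega
        rw [if_neg hA0]
        have hB0 : ¬ findPlant arr (min (finish + k) ((arr.length : Int) - 1)) < 0 := by
          rw [hfp]; omega
        rw [if_neg hB0]
        have e2 : (((bisectRightFrom (auxOf arr) (finish + k) begin : Nat) : Int) - 1).toNat =
            bisectRightFrom (auxOf arr) (finish + k) begin - 1 := by omega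
        simp only [e2]
        have e3 : (auxOf arr).getD (bisectRightFrom (auxOf arr) (finish + k) begin - 1) 0 =
            (auxOf arr)[bisectRightFrom (auxOf arr) (finish + k) begin - 1]'hin :=
          List.getD_eq_getElem _ 0 hin
        simp only [e3, hfp]
        have e4 : (auxOf arr)[bisectRightFrom (auxOf arr) (finish + k) begin - 1]'hin + (k - 1) =
            (auxOf arr)[bisectRightFrom (auxOf arr) (finish + k) begin - 1]'hin + k - 1 := by ring
        simp only [e4]
        by_cases heq : (auxOf arr)[bisectRightFrom (auxOf arr) (finish + k) begin - 1]'hin + k - 1 = finish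
        · rw [if_pos heq, if_pos heq]
        · rw [if_neg heq, if_neg heq]
          have hk1 : 1 ≤ k := by
            rcases hInv with ⟨-, hf⟩ | ⟨hk, -, -⟩
            · omega
            · exact hk
          exact ih _ _ _ (Or.inr ⟨hk1, hin, by rw [e3]; omega⟩)
    · rw [if_neg hg, if_neg hg]

-- ===== VERDICT (by name: the statement is the Claim_ definition above) =====
theorem pylons_spec : Claim_equal_pylons := by
  intro k arr _
  unfold Spec_pylons pylons pylons_alt
  simp only [auxOf_eq_foldl]
  exact loop_eq k arr (arr.length + 1) (-1) 0 0 (Or.inl ⟨rfl, rfl⟩)
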